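-- pv_equiv track=rewrite | github.com/pypi-data/pypi-mirror-97 | packages/spampost/spampost-1.0.4-py3-none-any.whl/spampost/__init__.py | count_eng_toks
-- ===== SOURCE A (Python) =====
-- def is_alpha(s):
--     d = 'ABCDEFGHIJKLMNOPQRSTUVWXYZ'
--     for c in s:
--         if c.upper() not in d:
--             return False
--     return True
--
-- def count_eng_toks(toks):
--     n = 0
--     for tok in toks:
--         if is_alpha(tok) or tok.isdigit():
--             n += 1
--         else:
--             n = 0
--     return n
-- ===== SOURCE B (Python) =====
-- def is_alpha(s):
--     d = 'ABCDEFGHIJKLMNOPQRSTUVWXYZ'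
--     for c in s:
--         if c.upper() not in d:
--             return False
--     return True
--
-- def count_eng_toks(toks):
--     n = 0
--     for tok in reversed(toks):
--         if is_alpha(tok) or tok.isdigit():
--             n += 1
--         else:
--             break
--     return n
-- ===== Notes on version B (the rewrite author's own statement) =====
-- stated objective: alternative
-- what changed: Replaces the forward reset-to-zero scan with a backward scan that counts good tokens and breaks at the first bad one (early exit instead of scanning the whole list).
import Mathlib
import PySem

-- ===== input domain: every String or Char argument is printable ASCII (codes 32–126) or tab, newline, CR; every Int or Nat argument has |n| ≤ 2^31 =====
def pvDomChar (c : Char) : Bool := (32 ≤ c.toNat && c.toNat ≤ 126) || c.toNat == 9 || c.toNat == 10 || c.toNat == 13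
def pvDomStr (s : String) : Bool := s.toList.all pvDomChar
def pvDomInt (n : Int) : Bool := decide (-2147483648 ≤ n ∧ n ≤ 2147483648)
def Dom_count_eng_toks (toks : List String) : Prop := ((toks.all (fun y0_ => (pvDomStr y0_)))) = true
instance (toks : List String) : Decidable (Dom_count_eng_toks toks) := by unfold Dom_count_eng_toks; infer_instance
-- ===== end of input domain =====

-- B replaces A's forward reset-to-zero scan with a backward count-and-break scan (alternative decomposition, same result).

-- ===== PORT A =====
-- shared helper: Python is_alpha (empty string is True; membership test against the uppercase alphabet)
def pvIsAlphaGo : List Char → Bool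
  | [] => true
  | c :: rest =>
    if ("ABCDEFGHIJKLMNOPQRSTUVWXYZ".toList.contains (PySem.Chars.upperChar c)) = false then false
    else pvIsAlphaGo rest

def is_alpha (s : String) : Bool := pvIsAlphaGo s.toList

def count_eng_toks (toks : List String) : Int :=
  toks.foldl (fun n tok => if is_alpha tok || PySem.Str.strIsdigit tok then n + 1 else 0) 0

-- ===== PORT B =====
-- backward scan: count good tokens from the end, break on the first bad one
def pvCountBack : List String → Int
  | [] => 0
  | tok :: rest =>
    if is_alpha tok || PySem.Str.strIsdigit tok then pvCountBack rest + 1 else 0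

def count_eng_toks_alt (toks : List String) : Int := pvCountBack toks.reverse

-- ===== PRECONDITION & SPEC =====
def Spec_count_eng_toks (toks : List String) (out : Int) : Prop := out = count_eng_toks_alt toks
instance (toks : List String) (out : Int) : Decidable (Spec_count_eng_toks toks out) := by unfold Spec_count_eng_toks; infer_instance

-- ===== CLAIM (what is proved, stated in full; the proofs are below) =====
def Claim_equal_count_eng_toks : Prop := ∀ (toks : List String), Dom_count_eng_toks toks → Spec_count_eng_toks toks (count_eng_toks toks)

-- ===== LEMMAS AND PROOFS =====
theorem foldl_eq_countBack (toks : List String) :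
    toks.foldl (fun n tok => if is_alpha tok || PySem.Str.strIsdigit tok then n + 1 else 0) 0
      = pvCountBack toks.reverse := by
  induction toks using List.reverseRecOn with
  | nil => rfl
  | append_singleton l t ih =>
    rw [List.foldl_append, List.reverse_append]
    rw [List.reverse_singleton, List.singleton_append]
    simp only [List.foldl_cons, List.foldl_nil, pvCountBack, ih]

-- ===== VERDICT (by name: the statement is the Claim_ definition above) =====
theorem count_eng_toks_spec : Claim_equal_count_eng_toks := by
  intro toks _
  unfold Spec_count_eng_toks count_eng_toks count_eng_toks_alt
  exact foldl_eq_countBack toks
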